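-- pv_equiv track=rewrite | github.com/defund/ctf | dicectf-finals-2024/mental-poker/scripts/grade.py | count_streaks
-- ===== SOURCE A (Python) =====
-- def count_streaks(history: list[bool]) -> int:
--     curr_streak = 0
--     total = 0
--     for b in history + [False]:
--         if b:
--             curr_streak = curr_streak + 1
--         else:
--             if curr_streak >= 3:
--                 total += curr_streak
--             curr_streak = 0
--     return total
-- ===== SOURCE B (Python) =====
-- def count_streaks(history: list[bool]) -> int:
--     # Delimiter-index method: True-runs are the gaps between consecutive False
--     # positions (with virtual delimiters at -1 and len(history)).
--     n = len(history)
--     falses = [-1] + [i for i, b in enumerate(history) if not b] + [n]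
--     return sum(g for g in (b - a - 1 for a, b in zip(falses, falses[1:])) if g >= 3)
-- ===== Notes on version B (the rewrite author's own statement) =====
-- stated objective: alternative
-- what changed: Instead of maintaining a running streak counter with a sentinel, B first collects the index positions of all False elements (with virtual delimiters -1 and len(history)) and then sums the gaps between consecutive delimiters that are at least 3, turning the run-length bookkeeping into index arithmetic.
import Mathlib
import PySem

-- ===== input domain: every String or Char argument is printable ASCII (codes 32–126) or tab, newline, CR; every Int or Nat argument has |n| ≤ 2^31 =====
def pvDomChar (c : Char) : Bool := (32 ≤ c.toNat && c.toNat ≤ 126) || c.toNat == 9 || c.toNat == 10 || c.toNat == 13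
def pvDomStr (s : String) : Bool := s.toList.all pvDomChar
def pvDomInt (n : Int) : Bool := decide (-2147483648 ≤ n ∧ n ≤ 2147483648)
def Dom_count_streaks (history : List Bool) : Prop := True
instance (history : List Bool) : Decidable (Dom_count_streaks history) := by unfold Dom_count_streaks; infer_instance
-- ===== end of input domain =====

-- B replaces A's running streak counter (with its [False] sentinel) by index arithmetic:
-- collect the positions of the False delimiters and sum the gaps ≥ 3 (alternative, same cost).

-- ===== PORT A =====
-- the loop state is (curr_streak, total); A iterates over history ++ [False]
def count_streaks (history : List Bool) : Int :=
  let r := (history ++ [false]).foldl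
    (fun s b => if b then (s.1 + 1, s.2) else ((0 : Int), s.2 + if s.1 ≥ 3 then s.1 else 0))
    ((0 : Int), (0 : Int))
  r.2

-- ===== PORT B =====
-- falses = [-1] + [i for i, b in enumerate(history) if not b] + [n]
-- sum of g for g in adjacent differences minus one, if g >= 3
def count_streaks_alt (history : List Bool) : Int :=
  let n : Int := history.length
  let falses : List Int :=
    [-1] ++ ((PySem.List.enumerate history 0).filterMap
              (fun p => if p.2 then none else some p.1)) ++ [n]
  (falses.zip (falses.drop 1)).foldl
    (fun t p => if p.2 - p.1 - 1 ≥ 3 then t + (p.2 - p.1 - 1) else t) 0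

-- ===== PRECONDITION & SPEC =====
def Spec_count_streaks (history : List Bool) (out : Int) : Prop := out = count_streaks_alt history
instance (history : List Bool) (out : Int) : Decidable (Spec_count_streaks history out) := by unfold Spec_count_streaks; infer_instance

-- ===== CLAIM (what is proved, stated in full; the proofs are below) =====
def Claim_equal_count_streaks : Prop := ∀ (history : List Bool), Dom_count_streaks history → Spec_count_streaks history (count_streaks history)

-- ===== LEMMAS AND PROOFS =====

-- the tail of A's computation, as a function of the pending streak length c
def pvF (c : Int) : List Bool → Int
  | [] => if c ≥ 3 then c else 0
  | true :: rest => pvF (c + 1) rest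
  | false :: rest => (if c ≥ 3 then c else 0) + pvF 0 rest

lemma pvFoldl_F (l : List Bool) : ∀ c t : Int,
    ((l ++ [false]).foldl
      (fun s b => if b then (s.1 + 1, s.2) else ((0 : Int), s.2 + if s.1 ≥ 3 then s.1 else 0))
      (c, t)).2 = t + pvF c l := by
  induction l with
  | nil => intro c t; simp [pvF]
  | cons b rest ih =>
      intro c t
      cases b
      · rw [List.cons_append, List.foldl_cons]
        simp only [Bool.false_eq_true, if_false]
        rw [ih]
        simp [pvF, add_assoc]
      · rw [List.cons_append, List.foldl_cons]
        simp only [if_true]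
        rw [ih]
        simp [pvF]

-- recursive form of the adjacent-gap sum: prev is the previous delimiter
def pvGaps (prev : Int) : List Int → Int
  | [] => 0
  | x :: xs => (if x - prev - 1 ≥ 3 then x - prev - 1 else 0) + pvGaps x xs

-- B's foldl over the zipped adjacent pairs computes pvGaps
lemma pvZipFoldl (ys : List Int) : ∀ p t : Int,
    (((p :: ys).zip ys).foldl
      (fun t q => if q.2 - q.1 - 1 ≥ 3 then t + (q.2 - q.1 - 1) else t) t)
    = t + pvGaps p ys := by
  induction ys with
  | nil => intro p t; simp [pvGaps]
  | cons y ys ih =>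
      intro p t
      simp only [List.zip_cons_cons, List.foldl_cons]
      rw [ih]
      simp only [pvGaps]
      split_ifs <;> ring

-- the filterMap over enumerate, as a recursion carrying the current index k
lemma pvEnumFalse (l : List Bool) : ∀ (k prev : Int),
    pvGaps prev (((PySem.List.enumerate l k).filterMap
        (fun p => if p.2 then none else some p.1)) ++ [k + l.length])
      = pvF (k - prev - 1) l := by
  induction l with
  | nil => intro k prev; simp [PySem.List.enumerate_nil, pvGaps, pvF]
  | cons b rest ih =>
      intro k prev
      rw [PySem.List.enumerate_cons]
      simp only [List.length_cons]
      push_cast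
      rw [show (k : Int) + ((rest.length : Int) + 1) = (k + 1) + (rest.length : Int) by ring]
      cases b
      · simp only [List.filterMap_cons, Bool.false_eq_true, if_false, List.cons_append, pvGaps]
        rw [ih (k + 1) k]
        rw [show (k + 1 : Int) - k - 1 = 0 by ring]
        simp only [pvF]
      · simp only [List.filterMap_cons, if_true]
        rw [ih (k + 1) prev]
        rw [show (k + 1 : Int) - prev - 1 = (k - prev - 1) + 1 by ring]
        simp [pvF]

-- ===== VERDICT (by name: the statement is the Claim_ definition above) =====
theorem count_streaks_spec : Claim_equal_count_streaks := by
  intro history _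
  unfold Spec_count_streaks count_streaks count_streaks_alt
  rw [pvFoldl_F]
  simp only [List.cons_append, List.nil_append, List.drop_succ_cons, List.drop_zero]
  rw [pvZipFoldl]
  have := pvEnumFalse history 0 (-1)
  simp only [show (0:Int) - (-1) - 1 = 0 by ring] at this
  rw [show ((0:Int) + (history.length : Int)) = (history.length : Int) by ring] at this
  rw [this]
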